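-- pv_equiv track=rewrite | github.com/sharhar/tm2d | tm2d/ctf/ctf.py | _even_index_to_mn
-- ===== SOURCE A (Python) =====
-- def _even_index_to_mn(i: int) -> tuple[int, int]:
--     # Z0^0, Z2^-2, Z2^0, Z2^2, Z4^-4, Z4^-2, Z4^0, ...
--     count = 0
--     n = 0
--     while True:
--         for m in range(-n, n + 1, 2):
--             if count == i:
--                 return m, n
--             count += 1
--         n += 2
-- ===== SOURCE B (Python) =====
-- def _even_index_to_mn(i: int) -> tuple[int, int]:
--     # closed form: write i = k*k + j with 0 <= j <= 2k; then n = 2k, m = -n + 2*j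
--     k = 0
--     while (k + 1) * (k + 1) <= i:
--         k += 1
--     n = 2 * k
--     return -n + 2 * (i - k * k), n
-- ===== Notes on version B (the rewrite author's own statement) =====
-- stated objective: faster
-- what changed: replaces the nested enumeration loop (counting every (m,n) pair up to index i) by an integer-sqrt closed form: find k with k*k <= i < (k+1)*(k+1), then n = 2k, m = -n + 2*(i - k*k)
-- outside the precondition, e.g. on _even_index_to_mn(-1): A does not finish within the time limit, B returns (-2, 0)
import Mathlib
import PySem

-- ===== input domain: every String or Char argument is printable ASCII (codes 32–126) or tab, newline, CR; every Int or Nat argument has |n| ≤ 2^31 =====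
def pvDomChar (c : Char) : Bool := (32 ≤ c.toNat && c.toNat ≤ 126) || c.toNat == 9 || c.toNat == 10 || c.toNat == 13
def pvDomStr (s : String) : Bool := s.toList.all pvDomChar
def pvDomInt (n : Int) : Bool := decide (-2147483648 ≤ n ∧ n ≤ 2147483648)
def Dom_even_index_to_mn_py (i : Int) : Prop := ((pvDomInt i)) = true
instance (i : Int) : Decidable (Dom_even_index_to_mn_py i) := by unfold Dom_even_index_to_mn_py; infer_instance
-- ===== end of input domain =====

-- B replaces A's O(i) pair-by-pair enumeration by an O(sqrt i) integer-sqrt closed form.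

-- ===== PORT A =====
-- inner 'for m in range(-n, n+1, 2)' loop: returns (some (m, n), _) on 'count == i',
-- otherwise (none, final count)
def evenInnerA (i : Int) (ms : List Int) (count : Int) (n : Int) : Option (Int × Int) × Int :=
  match ms with
  | [] => (none, count)
  | m :: rest => if count = i then (some (m, n), count) else evenInnerA i rest (count + 1) n

-- outer 'while True' loop; fuel i.toNat + 1 is enough for every i on which the Python returns
-- (the guard only makes the same computation total — the fuel-exhausted default below is never reached under Pre_)
def evenOuterA (i : Int) : Int → Int → Nat → Int × Int
  | _, _, 0 => (0, 0)
  | count, n, fuel + 1 =>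
    match evenInnerA i (PySem.List.pyRange (-n) (n + 1) 2) count n with
    | (some r, _) => r
    | (none, c) => evenOuterA i c (n + 2) fuel

def even_index_to_mn_py (i : Int) : Int × Int :=
  evenOuterA i 0 0 (i.toNat + 1)

-- ===== PORT B =====
-- 'while (k+1)*(k+1) <= i: k += 1' with the same totalising fuel
def bSqrtLoop (i : Int) : Int → Nat → Int
  | k, 0 => k
  | k, fuel + 1 => if (k + 1) * (k + 1) ≤ i then bSqrtLoop i (k + 1) fuel else k

def even_index_to_mn_py_alt (i : Int) : Int × Int :=
  let k := bSqrtLoop i 0 (i.toNat + 1)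
  let n := 2 * k
  (-n + 2 * (i - k * k), n)

-- ===== PRECONDITION & SPEC =====
-- A's while-loop never terminates for i < 0 (count only counts upward from 0), so those inputs
-- are excluded; A returns on exactly the inputs Pre_ admits.
def Pre_even_index_to_mn_py (i : Int) : Prop := 0 ≤ i
instance (i : Int) : Decidable (Pre_even_index_to_mn_py i) := by unfold Pre_even_index_to_mn_py; infer_instance
def pvWitness_even_index_to_mn_py : Int := 5

def Spec_even_index_to_mn_py (i : Int) (out : Int × Int) : Prop := out = even_index_to_mn_py_alt i
instance (i : Int) (out : Int × Int) : Decidable (Spec_even_index_to_mn_py i out) := by unfold Spec_even_index_to_mn_py; infer_instance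

-- ===== CLAIM (what is proved, stated in full; the proofs are below) =====
def Claim_equal_even_index_to_mn_py : Prop := ∀ (i : Int), Dom_even_index_to_mn_py i → Pre_even_index_to_mn_py i → Spec_even_index_to_mn_py i (even_index_to_mn_py i)

-- ===== LEMMAS AND PROOFS =====

-- if the whole inner list is passed without count reaching i, count advances by its length
theorem evenInnerA_miss (i n : Int) : ∀ (ms : List Int) (count : Int),
    count + (ms.length : Int) ≤ i →
    evenInnerA i ms count n = (none, count + (ms.length : Int)) := by
  intro ms
  induction ms with
  | nil => intro count _; simp [evenInnerA]
  | cons m rest ih =>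
    intro count h
    simp only [List.length_cons] at h ⊢
    have hne : count ≠ i := by push_cast at h; omega
    have := ih (count + 1) (by push_cast at h ⊢; omega)
    simp [evenInnerA, hne, this]
    ring

-- if i is reached at position j of the inner list, the hit value is ms[j]
theorem evenInnerA_hit (i n : Int) : ∀ (ms : List Int) (count : Int) (j : Nat)
    (hj : j < ms.length), count + (j : Int) = i →
    evenInnerA i ms count n = (some (ms[j], n), i) := by
  intro ms
  induction ms with
  | nil => intro _ j hj _; simp at hj
  | cons m rest ih =>
    intro count j hj hcount
    cases j with
    | zero =>
      have : count = i := by omega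
      simp [evenInnerA, this]
    | succ j' =>
      have hne : count ≠ i := by push_cast at hcount; omega
      have := ih (count + 1) j' (by simpa using hj) (by push_cast at hcount ⊢; omega)
      simp [evenInnerA, hne, this]

-- the two loops march in lockstep: at stage k, A's count is k*k and its n is 2k;
-- A advances to the next stage exactly when B's loop condition (k+1)^2 ≤ i holds
theorem outer_eq (i : Int) : ∀ (fuel : Nat) (k : Int), 0 ≤ k → k * k ≤ i →
    i - k * k < (fuel : Int) →
    evenOuterA i (k * k) (2 * k) fuel =
      (-(2 * bSqrtLoop i k fuel) + 2 * (i - bSqrtLoop i k fuel * bSqrtLoop i k fuel),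
        2 * bSqrtLoop i k fuel) := by
  intro fuel
  induction fuel with
  | zero =>
    intro k _ hk2 hfuel
    simp at hfuel
    linarith
  | succ fuel ih =>
    intro k hk hk2 hfuel
    have hexp : (k + 1) * (k + 1) = k * k + 2 * k + 1 := by ring
    have hrange : PySem.List.pyRange (-(2 * k)) (2 * k + 1) 2 =
        (List.range (2 * k + 1).toNat).map (fun (j : Nat) => -(2 * k) + 2 * (j : Int)) := by
      rw [PySem.List.pyRange_of_pos _ _ (by norm_num : (0:Int) < 2)]
      have hlt : -(2 * k) < 2 * k + 1 := by omega
      rw [if_pos hlt, show (2 * k + 1 - -(2 * k) + 2 - 1) / 2 = 2 * k + 1 from by omega]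
    have hlen : (((List.range (2 * k + 1).toNat).map
        (fun (j : Nat) => -(2 * k) + 2 * (j : Int))).length : Int) = 2 * k + 1 := by
      simp; omega
    by_cases hcond : (k + 1) * (k + 1) ≤ i
    · -- A scans the whole row and moves to stage k+1; B increments k
      have hmiss := evenInnerA_miss i (2 * k)
        ((List.range (2 * k + 1).toNat).map (fun (j : Nat) => -(2 * k) + 2 * (j : Int)))
        (k * k) (by rw [hlen]; omega)
      rw [hlen] at hmiss
      have hc : k * k + (2 * k + 1) = (k + 1) * (k + 1) := by ring
      have hn : 2 * k + 2 = 2 * (k + 1) := by ring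
      simp only [evenOuterA, hrange, hmiss, hc, hn]
      rw [show bSqrtLoop i k (fuel + 1) = bSqrtLoop i (k + 1) fuel by
        simp [bSqrtLoop, hcond]]
      exact ih (k + 1) (by omega) hcond (by omega)
    · -- the hit is in this row, at offset j = i - k*k; B's loop stops at k
      have hj : (i - k * k).toNat < (2 * k + 1).toNat := by omega
      have hhit := evenInnerA_hit i (2 * k)
        ((List.range (2 * k + 1).toNat).map (fun (j : Nat) => -(2 * k) + 2 * (j : Int)))
        (k * k) (i - k * k).toNat (by simpa using hj) (by omega)
      have hval : ((List.range (2 * k + 1).toNat).map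
          (fun (j : Nat) => -(2 * k) + 2 * (j : Int)))[(i - k * k).toNat]'(by simpa using hj) =
          -(2 * k) + 2 * (i - k * k) := by
        rw [List.getElem_map, List.getElem_range]
        omega
      rw [hval] at hhit
      simp only [evenOuterA, hrange, hhit]
      rw [show bSqrtLoop i k (fuel + 1) = k by simp [bSqrtLoop, hcond]]

-- ===== VERDICT (by name: the statement is the Claim_ definition above) =====
theorem even_index_to_mn_py_spec : Claim_equal_even_index_to_mn_py := by
  intro i _ hpre
  unfold Spec_even_index_to_mn_py even_index_to_mn_py even_index_to_mn_py_alt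
  have h0 : (0 : Int) ≤ i := hpre
  have := outer_eq i (i.toNat + 1) 0 le_rfl (by omega) (by push_cast; omega)
  simpa using this
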